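-- pv_equiv track=rewrite | github.com/kovkir/bmstu-team-development | src/chess.py | createChessBool
-- ===== SOURCE A (Python) =====
-- def createChessBool(mainWhiteСolor: str):
--     '''
--     Получение булевой матрицы размера доски, каждый элемент которой
--     отвечает за присутствие фигуры в данной клетке
--     '''
--     chessBool = []
--
--     if mainWhiteСolor:
--         chessBool.append([False for _ in range(8)])
--         chessBool.append([False for _ in range(8)])
--     else:
--         chessBool.append([True for _ in range(8)])
--         chessBool.append([True for _ in range(8)])
--
--     for _ in range(4):
--         chessBool.append([False for _ in range(8)])
--
--     if mainWhiteСolor: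
--         chessBool.append([True for _ in range(8)])
--         chessBool.append([True for _ in range(8)])
--     else:
--         chessBool.append([False for _ in range(8)])
--         chessBool.append([False for _ in range(8)])
--
--     return chessBool
-- ===== SOURCE B (Python) =====
-- def createChessBool(mainWhiteColor: str):
--     # Build the canonical (main-white) board once: a piece sits in row r iff r // 6 == 1
--     # (i.e. the two bottom rows). The board for the other color is its vertical mirror,
--     # so reversing the canonical board's rows yields it -- no conditional construction.
--     canonical = [[r // 6 == 1] * 8 for r in range(8)]
--     return canonical if mainWhiteColor else canonical[::-1]
-- ===== Notes on version B (the rewrite author's own statement) =====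
-- stated objective: simpler
-- what changed: Instead of three conditional append blocks, B builds one canonical board (occupancy from the arithmetic rule r // 6 == 1) and derives the other color's board as its row-reversed vertical mirror, exploiting the boards' reflection symmetry.
import Mathlib
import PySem

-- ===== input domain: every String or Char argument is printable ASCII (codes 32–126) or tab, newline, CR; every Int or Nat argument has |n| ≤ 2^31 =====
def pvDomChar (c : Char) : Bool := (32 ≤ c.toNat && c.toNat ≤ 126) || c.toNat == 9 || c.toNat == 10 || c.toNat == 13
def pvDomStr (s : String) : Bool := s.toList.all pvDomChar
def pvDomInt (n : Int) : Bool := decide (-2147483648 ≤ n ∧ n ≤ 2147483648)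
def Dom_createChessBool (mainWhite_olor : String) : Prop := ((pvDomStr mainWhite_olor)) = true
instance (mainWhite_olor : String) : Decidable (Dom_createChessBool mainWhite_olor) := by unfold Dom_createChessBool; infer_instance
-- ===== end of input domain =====

-- B builds the canonical main-white board once (occupancy rule r // 6 == 1) and derives
-- the other color's board as its row-reversed vertical mirror (simpler).


-- ===== PORT A =====
-- literal transliteration: appends in the same order as the Python
def createChessBool (mainWhite_olor : String) : List (List Bool) :=
  let chessBool : List (List Bool) := []
  let chessBool :=
    if mainWhite_olor ≠ "" then
      chessBool ++ [(List.range 8).map (fun _ => false)] ++ [(List.range 8).map (fun _ => false)]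
    else
      chessBool ++ [(List.range 8).map (fun _ => true)] ++ [(List.range 8).map (fun _ => true)]
  let chessBool := (List.range 4).foldl (fun acc _ => acc ++ [(List.range 8).map (fun _ => false)]) chessBool
  let chessBool :=
    if mainWhite_olor ≠ "" then
      chessBool ++ [(List.range 8).map (fun _ => true)] ++ [(List.range 8).map (fun _ => true)]
    else
      chessBool ++ [(List.range 8).map (fun _ => false)] ++ [(List.range 8).map (fun _ => false)]
  chessBool

-- ===== PORT B =====
-- canonical board from the arithmetic rule r // 6 == 1; the other color is its mirror
def createChessBool_alt (mainWhite_olor : String) : List (List Bool) :=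
  let canonical := (List.range 8).map (fun r => (List.range 8).map (fun _ => decide (r / 6 = 1)))
  if mainWhite_olor ≠ "" then canonical else canonical.reverse

-- ===== PRECONDITION & SPEC =====
def Spec_createChessBool (mainWhite_olor : String) (out : List (List Bool)) : Prop := out = createChessBool_alt mainWhite_olor
instance (mainWhite_olor : String) (out : List (List Bool)) : Decidable (Spec_createChessBool mainWhite_olor out) := by unfold Spec_createChessBool; infer_instance

-- ===== CLAIM (what is proved, stated in full; the proofs are below) =====
def Claim_equal_createChessBool : Prop := ∀ (mainWhite_olor : String), Dom_createChessBool mainWhite_olor → Spec_createChessBool mainWhite_olor (createChessBool mainWhite_olor)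

-- ===== LEMMAS AND PROOFS =====

-- ===== VERDICT (by name: the statement is the Claim_ definition above) =====
theorem createChessBool_spec : Claim_equal_createChessBool := by
  intro s _
  unfold Spec_createChessBool createChessBool createChessBool_alt
  by_cases h : s = "" <;> simp [h] <;> decide
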